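-- pv_equiv track=rewrite | github.com/thechaos16/project-Euler | python/111st_notcomplete.py | slist
-- ===== SOURCE A (Python) =====
-- def slist(d,sol):
--     res = [[]]
--     for i in range(sol):
--         tempres = []
--         for j in range(len(res)):
--             for k in range(10):
--                 if k!=d:
--                     temp = res[j]+[str(k)]
--                     tempres.append(temp)
--         res = []
--         for j in range(len(tempres)):
--             res.append(tempres[j])
--     return res
-- ===== SOURCE B (Python) =====
-- def slist(d, sol):
--     if sol <= 0:
--         return [[]]
--     return [[str(k)] + t
--             for k in range(10) if k != d
--             for t in slist(d, sol - 1)]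
-- ===== Notes on version B (the rewrite author's own statement) =====
-- stated objective: simpler
-- what changed: Replaces three nested index loops plus a copy loop that append the least-significant digit level by level with a short recursion on the length that prepends the most-significant digit to each shorter suffix.
import Mathlib
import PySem

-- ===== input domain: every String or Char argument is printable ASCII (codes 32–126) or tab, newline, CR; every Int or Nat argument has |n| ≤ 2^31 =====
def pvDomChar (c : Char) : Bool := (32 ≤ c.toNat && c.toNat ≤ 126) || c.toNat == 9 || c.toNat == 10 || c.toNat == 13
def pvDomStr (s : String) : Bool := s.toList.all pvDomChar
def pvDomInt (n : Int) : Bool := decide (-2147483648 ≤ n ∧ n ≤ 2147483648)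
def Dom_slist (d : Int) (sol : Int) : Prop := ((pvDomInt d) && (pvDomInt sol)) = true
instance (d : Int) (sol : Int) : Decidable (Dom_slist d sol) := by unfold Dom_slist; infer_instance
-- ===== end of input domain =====

-- B replaces the three nested index loops plus copy loop (append least-significant digit
-- level by level) with a short recursion on the length that prepends the most-significant
-- digit to every shorter suffix; objective: simpler.

-- ===== PORT A =====
def slist (d : Int) (sol : Int) : List (List String) :=
  (List.range sol.toNat).foldl (fun res _ =>
    let tempres := res.foldl (fun tempres r =>
      (List.range 10).foldl (fun tempres k =>
        if (k : Int) ≠ d then tempres ++ [r ++ [PySem.Int.toStr (k : Int)]] else tempres)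
        tempres) []
    tempres.foldl (fun res2 t => res2 ++ [t]) []) [[]]

-- ===== PORT B =====
def slistAltAux (d : Int) : Nat → List (List String)
  | 0 => [[]]
  | n+1 => ((List.range 10).filter (fun k => (k : Int) ≠ d)).flatMap
             (fun k => (slistAltAux d n).map (fun t => [PySem.Int.toStr (k : Int)] ++ t))

def slist_alt (d : Int) (sol : Int) : List (List String) :=
  if sol ≤ 0 then [[]] else slistAltAux d sol.toNat

-- ===== PRECONDITION & SPEC =====
def Spec_slist (d : Int) (sol : Int) (out : List (List String)) : Prop := out = slist_alt d sol
instance (d : Int) (sol : Int) (out : List (List String)) : Decidable (Spec_slist d sol out) := by unfold Spec_slist; infer_instance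

-- ===== CLAIM (what is proved, stated in full; the proofs are below) =====
def Claim_equal_slist : Prop := ∀ (d : Int) (sol : Int), Dom_slist d sol → Spec_slist d sol (slist d sol)

-- ===== LEMMAS AND PROOFS =====

-- one level of A's loop, after the folds are flattened
def pvStep (D : List String) (xs : List (List String)) : List (List String) :=
  xs.flatMap (fun r => D.map (fun s => r ++ [s]))

-- generic form of B's recursion
def pvAux (D : List String) : Nat → List (List String)
  | 0 => [[]]
  | n+1 => D.flatMap (fun s => (pvAux D n).map (fun t => s :: t))

-- A's digit alphabet
def pvDigits (d : Int) : List String :=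
  ((List.range 10).filter (fun k => (k : Int) ≠ d)).map (fun k => PySem.Int.toStr (k : Int))

theorem pvAux_eq_slistAltAux (d : Int) (n : Nat) :
    pvAux (pvDigits d) n = slistAltAux d n := by
  induction n with
  | zero => rfl
  | succ n ih =>
    rw [pvAux, slistAltAux, ih, pvDigits, List.flatMap_map]
    simp

-- appending the next digit to all sequences = prepending the first digit to all shorter ones
theorem pvStep_pvAux (D : List String) (n : Nat) :
    pvStep D (pvAux D n) = pvAux D (n + 1) := by
  induction n with
  | zero =>
    induction D with
    | nil => rfl
    | cons s D ih => simp_all [pvStep, pvAux]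
  | succ n ih =>
    rw [pvAux, pvStep, List.flatMap_assoc, pvAux, ← ih, pvStep]
    simp [List.map_flatMap, List.flatMap_map, List.map_map, Function.comp_def]

-- A's inner digit loop produces the digit alphabet appended to r
theorem pvInner (d : Int) (r : List String) (acc : List (List String)) :
    (List.range 10).foldl (fun tempres k =>
        if (k : Int) ≠ d then tempres ++ [r ++ [PySem.Int.toStr (k : Int)]] else tempres) acc
      = acc ++ (pvDigits d).map (fun s => r ++ [s]) := by
  rw [PySem.List.foldl_append_ite (p := fun k => (k : Int) ≠ d)
      (f := fun k => r ++ [PySem.Int.toStr (k : Int)])]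
  simp [pvDigits, List.map_map, Function.comp_def]

-- A's body, with all four loops flattened to pvStep
theorem slist_eq_loop (d : Int) (sol : Int) :
    slist d sol = (List.range sol.toNat).foldl (fun res _ => pvStep (pvDigits d) res) [[]] := by
  unfold slist
  refine PySem.List.foldl_congr_mem _ _ _ _ (fun res i _ => ?_)
  simp only [PySem.List.foldl_append_singleton_eq_self, List.nil_append]
  have h : res.foldl (fun tempres r =>
      (List.range 10).foldl (fun tempres k =>
        if (k : Int) ≠ d then tempres ++ [r ++ [PySem.Int.toStr (k : Int)]] else tempres)
        tempres) []
      = res.foldl (fun tempres r => tempres ++ (pvDigits d).map (fun s => r ++ [s])) [] :=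
    PySem.List.foldl_congr_mem _ _ _ _ (fun acc r _ => pvInner d r acc)
  rw [h, PySem.List.foldl_append_eq_flatMap, List.nil_append, pvStep]

theorem pvLoop_eq_pvAux (d : Int) (n : Nat) :
    (List.range n).foldl (fun res _ => pvStep (pvDigits d) res) [[]] = pvAux (pvDigits d) n := by
  induction n with
  | zero => rfl
  | succ n ih =>
    rw [List.range_succ, List.foldl_append, ih, List.foldl_cons, List.foldl_nil, pvStep_pvAux]

-- ===== VERDICT (by name: the statement is the Claim_ definition above) =====
theorem slist_spec : Claim_equal_slist := by
  intro d sol _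
  unfold Spec_slist slist_alt
  rw [slist_eq_loop, pvLoop_eq_pvAux, pvAux_eq_slistAltAux]
  split_ifs with h
  · have h0 : sol.toNat = 0 := by omega
    rw [h0]; rfl
  · rfl
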